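-- pv_equiv track=rewrite | github.com/shamanshetty/taal | backend/app/services/memory_service.py | _parse_memory_sections
-- ===== SOURCE A (Python) =====
-- from typing import Any, Dict, List, Sequence, Tuple
--
-- def _parse_memory_sections(content: str) -> Tuple[List[str], List[str]]:
--     facts: List[str] = []
--     followups: List[str] = []
--     section: str | None = None
--     for raw_line in content.splitlines():
--         line = raw_line.strip()
--         if not line:
--             continue
--         if line.lower().startswith("user facts"):
--             section = "facts"
--             continue
--         if line.lower().startswith("follow-ups"):
--             section = "followups"
--             continue
--         if line.startswith("-"):
--             value = line[1:].strip()
--             if value.upper() == "NO_MEMORY":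
--                 continue
--             if section == "facts":
--                 facts.append(value)
--             elif section == "followups":
--                 followups.append(value)
--     return facts, followups
-- ===== SOURCE B (Python) =====
-- from typing import List, Tuple
--
-- def _parse_memory_sections(content: str) -> Tuple[List[str], List[str]]:
--     # Pass 1: split the stripped non-empty lines into header-delimited blocks.
--     blocks: List[Tuple[str, List[str]]] = []
--     current: List[str] | None = None
--     for raw_line in content.splitlines():
--         line = raw_line.strip()
--         if not line:
--             continue
--         if line.lower().startswith("user facts"):
--             current = []
--             blocks.append(("facts", current))
--         elif line.lower().startswith("follow-ups"):
--             current = []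
--             blocks.append(("followups", current))
--         elif current is not None:
--             current.append(line)
--     # Pass 2: extract the bullet values of each block, in block order.
--     facts: List[str] = []
--     followups: List[str] = []
--     for tag, lines in blocks:
--         vals = [ln[1:].strip() for ln in lines if ln.startswith("-")]
--         vals = [v for v in vals if v.upper() != "NO_MEMORY"]
--         if tag == "facts":
--             facts.extend(vals)
--         else:
--             followups.extend(vals)
--     return facts, followups
-- ===== Notes on version B (the rewrite author's own statement) =====
-- stated objective: alternative
-- what changed: Replaces A's single stateful pass (a mode variable routing each bullet as it is seen) with a two-phase decomposition: first group stripped lines into header-delimited blocks, then reduce the blocks, extracting filtered bullet values per block.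
import Mathlib
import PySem

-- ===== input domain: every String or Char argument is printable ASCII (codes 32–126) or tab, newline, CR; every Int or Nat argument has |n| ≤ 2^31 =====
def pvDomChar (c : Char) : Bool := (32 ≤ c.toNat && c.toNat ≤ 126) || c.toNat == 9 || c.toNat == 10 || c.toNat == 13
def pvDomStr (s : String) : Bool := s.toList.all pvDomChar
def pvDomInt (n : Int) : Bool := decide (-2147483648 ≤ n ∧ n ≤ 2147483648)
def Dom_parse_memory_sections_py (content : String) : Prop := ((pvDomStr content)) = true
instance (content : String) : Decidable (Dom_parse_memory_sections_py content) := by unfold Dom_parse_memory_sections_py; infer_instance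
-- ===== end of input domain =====

-- B replaces A's single stateful pass by a two-phase decomposition (group lines into header blocks, then reduce the blocks); alternative, not faster.

-- ===== PORT A =====
-- one loop iteration of A (state = (facts, followups, section))
def pvAstep (st : List String × List String × Option String) (raw_line : String) :
    List String × List String × Option String :=
  let line := PySem.Str.strip raw_line
  if line = "" then st
  else if PySem.Str.startswith (PySem.Str.lower line) "user facts" = true then (st.1, st.2.1, some "facts")
  else if PySem.Str.startswith (PySem.Str.lower line) "follow-ups" = true then (st.1, st.2.1, some "followups")
  else if PySem.Str.startswith line "-" = true then
    let value := PySem.Str.strip (PySem.Str.slice line (some 1) none)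
    if PySem.Str.upper value = "NO_MEMORY" then st
    else if st.2.2 = some "facts" then (st.1 ++ [value], st.2.1, st.2.2)
    else if st.2.2 = some "followups" then (st.1, st.2.1 ++ [value], st.2.2)
    else st
  else st

def parse_memory_sections_py (content : String) : List String × List String :=
  let r := (PySem.Str.splitlines content).foldl pvAstep ([], [], none)
  (r.1, r.2.1)

-- ===== PORT B =====
-- phase 1: header-delimited blocks (cur = the open block; flushed when a header opens a new one or at the end)
def pvBlocks : List String → Option (String × List String) → List (String × List String)
  | [], cur => cur.toList
  | raw_line :: rest, cur =>
    let line := PySem.Str.strip raw_line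
    if line = "" then pvBlocks rest cur
    else if PySem.Str.startswith (PySem.Str.lower line) "user facts" = true then
      cur.toList ++ pvBlocks rest (some ("facts", []))
    else if PySem.Str.startswith (PySem.Str.lower line) "follow-ups" = true then
      cur.toList ++ pvBlocks rest (some ("followups", []))
    else match cur with
      | none => pvBlocks rest none
      | some (t, ls) => pvBlocks rest (some (t, ls ++ [line]))

-- phase 2: the filtered bullet values of one block's lines
def pvVals (ls : List String) : List String :=
  ((ls.filter (fun l => PySem.Str.startswith l "-")).map
      (fun l => PySem.Str.strip (PySem.Str.slice l (some 1) none))).filter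
    (fun v => !(PySem.Str.upper v == "NO_MEMORY"))

def pvEmit (st : List String × List String) (b : String × List String) : List String × List String :=
  let vals := pvVals b.2
  if b.1 = "facts" then (st.1 ++ vals, st.2) else (st.1, st.2 ++ vals)

def parse_memory_sections_py_alt (content : String) : List String × List String :=
  (pvBlocks (PySem.Str.splitlines content) none).foldl pvEmit ([], [])

-- ===== PRECONDITION & SPEC =====
def Spec_parse_memory_sections_py (content : String) (out : List String × List String) : Prop := out = parse_memory_sections_py_alt content
instance (content : String) (out : List String × List String) : Decidable (Spec_parse_memory_sections_py content out) := by unfold Spec_parse_memory_sections_py; infer_instance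

-- ===== CLAIM (what is proved, stated in full; the proofs are below) =====
def Claim_equal_parse_memory_sections_py : Prop := ∀ (content : String), Dom_parse_memory_sections_py content → Spec_parse_memory_sections_py content (parse_memory_sections_py content)

-- ===== LEMMAS AND PROOFS =====
-- flushing the open block into the accumulated (facts, followups) pair
def pvFlush (st : List String × List String) (cur : Option (String × List String)) :
    List String × List String :=
  match cur with
  | none => st
  | some b => pvEmit st b

def pvTag (cur : Option (String × List String)) : Option String :=
  match cur with
  | none => none
  | some (t, _) => some t

def pvMk (p : List String × List String) (s : Option String) :
    List String × List String × Option String := (p.1, p.2, s)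

def pvFst2 (x : List String × List String × Option String) : List String × List String :=
  (x.1, x.2.1)

-- characterizations of one step of A
lemma pvAstep_empty (st : List String × List String × Option String) (raw : String)
    (h1 : PySem.Str.strip raw = "") : pvAstep st raw = st := by
  simp only [pvAstep]; rw [if_pos h1]

lemma pvAstep_facts (st : List String × List String × Option String) (raw : String)
    (h1 : ¬ PySem.Str.strip raw = "")
    (h2 : PySem.Str.startswith (PySem.Str.lower (PySem.Str.strip raw)) "user facts" = true) :
    pvAstep st raw = (st.1, st.2.1, some "facts") := by
  simp only [pvAstep]; rw [if_neg h1, if_pos h2]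

lemma pvAstep_fups (st : List String × List String × Option String) (raw : String)
    (h1 : ¬ PySem.Str.strip raw = "")
    (h2 : ¬ PySem.Str.startswith (PySem.Str.lower (PySem.Str.strip raw)) "user facts" = true)
    (h3 : PySem.Str.startswith (PySem.Str.lower (PySem.Str.strip raw)) "follow-ups" = true) :
    pvAstep st raw = (st.1, st.2.1, some "followups") := by
  simp only [pvAstep]; rw [if_neg h1, if_neg h2, if_pos h3]

lemma pvAstep_nb (st : List String × List String × Option String) (raw : String)
    (h1 : ¬ PySem.Str.strip raw = "")
    (h2 : ¬ PySem.Str.startswith (PySem.Str.lower (PySem.Str.strip raw)) "user facts" = true)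
    (h3 : ¬ PySem.Str.startswith (PySem.Str.lower (PySem.Str.strip raw)) "follow-ups" = true)
    (h4 : ¬ PySem.Str.startswith (PySem.Str.strip raw) "-" = true) :
    pvAstep st raw = st := by
  simp only [pvAstep]; rw [if_neg h1, if_neg h2, if_neg h3, if_neg h4]

lemma pvAstep_nomem (st : List String × List String × Option String) (raw : String)
    (h1 : ¬ PySem.Str.strip raw = "")
    (h2 : ¬ PySem.Str.startswith (PySem.Str.lower (PySem.Str.strip raw)) "user facts" = true)
    (h3 : ¬ PySem.Str.startswith (PySem.Str.lower (PySem.Str.strip raw)) "follow-ups" = true)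
    (h4 : PySem.Str.startswith (PySem.Str.strip raw) "-" = true)
    (h5 : PySem.Str.upper (PySem.Str.strip (PySem.Str.slice (PySem.Str.strip raw) (some 1) none)) = "NO_MEMORY") :
    pvAstep st raw = st := by
  simp only [pvAstep]; rw [if_neg h1, if_neg h2, if_neg h3, if_pos h4, if_pos h5]

lemma pvAstep_bullet (st : List String × List String × Option String) (raw : String)
    (h1 : ¬ PySem.Str.strip raw = "")
    (h2 : ¬ PySem.Str.startswith (PySem.Str.lower (PySem.Str.strip raw)) "user facts" = true)
    (h3 : ¬ PySem.Str.startswith (PySem.Str.lower (PySem.Str.strip raw)) "follow-ups" = true)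
    (h4 : PySem.Str.startswith (PySem.Str.strip raw) "-" = true)
    (h5 : ¬ PySem.Str.upper (PySem.Str.strip (PySem.Str.slice (PySem.Str.strip raw) (some 1) none)) = "NO_MEMORY") :
    pvAstep st raw =
      (if st.2.2 = some "facts" then
        (st.1 ++ [PySem.Str.strip (PySem.Str.slice (PySem.Str.strip raw) (some 1) none)], st.2.1, st.2.2)
      else if st.2.2 = some "followups" then
        (st.1, st.2.1 ++ [PySem.Str.strip (PySem.Str.slice (PySem.Str.strip raw) (some 1) none)], st.2.2)
      else st) := by
  simp only [pvAstep]; rw [if_neg h1, if_neg h2, if_neg h3, if_pos h4, if_neg h5]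

-- characterizations of one step of B's phase 1
lemma pvBlocks_empty (raw : String) (rest : List String) (cur : Option (String × List String))
    (h1 : PySem.Str.strip raw = "") : pvBlocks (raw :: rest) cur = pvBlocks rest cur := by
  simp only [pvBlocks]; rw [if_pos h1]

lemma pvBlocks_facts (raw : String) (rest : List String) (cur : Option (String × List String))
    (h1 : ¬ PySem.Str.strip raw = "")
    (h2 : PySem.Str.startswith (PySem.Str.lower (PySem.Str.strip raw)) "user facts" = true) :
    pvBlocks (raw :: rest) cur = cur.toList ++ pvBlocks rest (some ("facts", [])) := by
  simp only [pvBlocks]; rw [if_neg h1, if_pos h2]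

lemma pvBlocks_fups (raw : String) (rest : List String) (cur : Option (String × List String))
    (h1 : ¬ PySem.Str.strip raw = "")
    (h2 : ¬ PySem.Str.startswith (PySem.Str.lower (PySem.Str.strip raw)) "user facts" = true)
    (h3 : PySem.Str.startswith (PySem.Str.lower (PySem.Str.strip raw)) "follow-ups" = true) :
    pvBlocks (raw :: rest) cur = cur.toList ++ pvBlocks rest (some ("followups", [])) := by
  simp only [pvBlocks]; rw [if_neg h1, if_neg h2, if_pos h3]

lemma pvBlocks_body_none (raw : String) (rest : List String)
    (h1 : ¬ PySem.Str.strip raw = "")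
    (h2 : ¬ PySem.Str.startswith (PySem.Str.lower (PySem.Str.strip raw)) "user facts" = true)
    (h3 : ¬ PySem.Str.startswith (PySem.Str.lower (PySem.Str.strip raw)) "follow-ups" = true) :
    pvBlocks (raw :: rest) none = pvBlocks rest none := by
  simp only [pvBlocks]; rw [if_neg h1, if_neg h2, if_neg h3]

lemma pvBlocks_body (raw : String) (rest : List String) (t : String) (ls : List String)
    (h1 : ¬ PySem.Str.strip raw = "")
    (h2 : ¬ PySem.Str.startswith (PySem.Str.lower (PySem.Str.strip raw)) "user facts" = true)
    (h3 : ¬ PySem.Str.startswith (PySem.Str.lower (PySem.Str.strip raw)) "follow-ups" = true) :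
    pvBlocks (raw :: rest) (some (t, ls)) = pvBlocks rest (some (t, ls ++ [PySem.Str.strip raw])) := by
  simp only [pvBlocks]; rw [if_neg h1, if_neg h2, if_neg h3]

-- facts about phase 2 on a grown block
lemma pvVals_append_one (ls : List String) (l : String) :
    pvVals (ls ++ [l]) =
      pvVals ls ++
        (if PySem.Str.startswith l "-" = true then
          (if PySem.Str.upper (PySem.Str.strip (PySem.Str.slice l (some 1) none)) = "NO_MEMORY"
            then [] else [PySem.Str.strip (PySem.Str.slice l (some 1) none)])
        else []) := by
  simp only [pvVals, List.filter_append, List.map_append, List.filter_cons, List.filter_nil]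
  split_ifs with h1 h2 <;> simp_all [List.filter_nil]

lemma pvVals_snoc_keep (ls : List String) (l : String)
    (h4 : PySem.Str.startswith l "-" = true)
    (h5 : ¬ PySem.Str.upper (PySem.Str.strip (PySem.Str.slice l (some 1) none)) = "NO_MEMORY") :
    pvVals (ls ++ [l]) = pvVals ls ++ [PySem.Str.strip (PySem.Str.slice l (some 1) none)] := by
  rw [pvVals_append_one, if_pos h4, if_neg h5]

lemma pvVals_snoc_drop (ls : List String) (l : String)
    (h : ¬ PySem.Str.startswith l "-" = true ∨
      PySem.Str.upper (PySem.Str.strip (PySem.Str.slice l (some 1) none)) = "NO_MEMORY") :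
    pvVals (ls ++ [l]) = pvVals ls := by
  rw [pvVals_append_one]
  rcases h with h | h
  · rw [if_neg h, List.append_nil]
  · by_cases h4 : PySem.Str.startswith l "-" = true
    · rw [if_pos h4, if_pos h, List.append_nil]
    · rw [if_neg h4, List.append_nil]

lemma pvFlush_facts (st : List String × List String) (ls : List String) :
    pvFlush st (some ("facts", ls)) = (st.1 ++ pvVals ls, st.2) := by
  simp [pvFlush, pvEmit]

lemma pvFlush_fups (st : List String × List String) (ls : List String) :
    pvFlush st (some ("followups", ls)) = (st.1, st.2 ++ pvVals ls) := by
  simp [pvFlush, pvEmit]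

lemma pvFlush_nil (st : List String × List String) (t : String) :
    pvFlush st (some (t, [])) = st := by
  cases st with
  | mk a b => simp [pvFlush, pvEmit, pvVals]

lemma pvFlush_foldl (st : List String × List String) (cur : Option (String × List String)) :
    cur.toList.foldl pvEmit st = pvFlush st cur := by
  cases cur <;> rfl

-- the loop invariant: running A's loop from the "cur already flushed" state equals B's block reduction
lemma pvKey (lines : List String) :
    ∀ (st : List String × List String) (cur : Option (String × List String)),
    (cur = none ∨ (∃ ls, cur = some ("facts", ls)) ∨ (∃ ls, cur = some ("followups", ls))) →
    pvFst2 (lines.foldl pvAstep (pvMk (pvFlush st cur) (pvTag cur)))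
      = (pvBlocks lines cur).foldl pvEmit st := by
  induction lines with
  | nil =>
    intro st cur _
    rcases cur with _ | b <;> simp [pvBlocks, pvFst2, pvMk, pvFlush]
  | cons raw rest ih =>
    intro st cur hok
    rw [List.foldl_cons]
    by_cases h1 : PySem.Str.strip raw = ""
    · rw [pvAstep_empty _ _ h1, pvBlocks_empty _ _ _ h1]
      exact ih st cur hok
    · by_cases h2 : PySem.Str.startswith (PySem.Str.lower (PySem.Str.strip raw)) "user facts" = true
      · rw [pvAstep_facts _ _ h1 h2, pvBlocks_facts _ _ _ h1 h2, List.foldl_append, pvFlush_foldl]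
        have := ih (pvFlush st cur) (some ("facts", [])) (Or.inr (Or.inl ⟨[], rfl⟩))
        rw [pvFlush_nil] at this
        exact this
      · by_cases h3 : PySem.Str.startswith (PySem.Str.lower (PySem.Str.strip raw)) "follow-ups" = true
        · rw [pvAstep_fups _ _ h1 h2 h3, pvBlocks_fups _ _ _ h1 h2 h3, List.foldl_append, pvFlush_foldl]
          have := ih (pvFlush st cur) (some ("followups", [])) (Or.inr (Or.inr ⟨[], rfl⟩))
          rw [pvFlush_nil] at this
          exact this
        · -- body line: bullet or plain text
          rcases hok with rfl | ⟨ls, rfl⟩ | ⟨ls, rfl⟩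
          · -- cur = none: A appends nothing (section is None), B collects nothing
            rw [pvBlocks_body_none _ _ h1 h2 h3]
            by_cases h4 : PySem.Str.startswith (PySem.Str.strip raw) "-" = true
            · by_cases h5 : PySem.Str.upper (PySem.Str.strip (PySem.Str.slice (PySem.Str.strip raw) (some 1) none)) = "NO_MEMORY"
              · rw [pvAstep_nomem _ _ h1 h2 h3 h4 h5]; exact ih st none (Or.inl rfl)
              · rw [pvAstep_bullet _ _ h1 h2 h3 h4 h5, if_neg (by simp [pvMk, pvTag]),
                  if_neg (by simp [pvMk, pvTag])]
                exact ih st none (Or.inl rfl)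
            · rw [pvAstep_nb _ _ h1 h2 h3 h4]; exact ih st none (Or.inl rfl)
          · -- cur is a "facts" block
            rw [pvBlocks_body _ _ _ _ h1 h2 h3]
            have ih' := ih st (some ("facts", ls ++ [PySem.Str.strip raw])) (Or.inr (Or.inl ⟨_, rfl⟩))
            by_cases h4 : PySem.Str.startswith (PySem.Str.strip raw) "-" = true
            · by_cases h5 : PySem.Str.upper (PySem.Str.strip (PySem.Str.slice (PySem.Str.strip raw) (some 1) none)) = "NO_MEMORY"
              · rw [pvAstep_nomem _ _ h1 h2 h3 h4 h5]
                rw [pvFlush_facts, pvVals_snoc_drop _ _ (Or.inr h5)] at ih'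
                rw [pvFlush_facts]
                exact ih'
              · rw [pvAstep_bullet _ _ h1 h2 h3 h4 h5]
                simp only [pvMk, pvTag]
                rw [if_pos trivial]
                rw [pvFlush_facts, pvVals_snoc_keep _ _ h4 h5, ← List.append_assoc] at ih'
                exact ih'
            · rw [pvAstep_nb _ _ h1 h2 h3 h4]
              rw [pvFlush_facts, pvVals_snoc_drop _ _ (Or.inl h4)] at ih'
              rw [pvFlush_facts]
              exact ih'
          · -- cur is a "followups" block
            rw [pvBlocks_body _ _ _ _ h1 h2 h3]
            have ih' := ih st (some ("followups", ls ++ [PySem.Str.strip raw])) (Or.inr (Or.inr ⟨_, rfl⟩))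
            by_cases h4 : PySem.Str.startswith (PySem.Str.strip raw) "-" = true
            · by_cases h5 : PySem.Str.upper (PySem.Str.strip (PySem.Str.slice (PySem.Str.strip raw) (some 1) none)) = "NO_MEMORY"
              · rw [pvAstep_nomem _ _ h1 h2 h3 h4 h5]
                rw [pvFlush_fups, pvVals_snoc_drop _ _ (Or.inr h5)] at ih'
                rw [pvFlush_fups]
                exact ih'
              · rw [pvAstep_bullet _ _ h1 h2 h3 h4 h5]
                simp only [pvMk, pvTag]
                rw [if_pos trivial]
                rw [pvFlush_fups, pvVals_snoc_keep _ _ h4 h5, ← List.append_assoc] at ih'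
                exact ih'
            · rw [pvAstep_nb _ _ h1 h2 h3 h4]
              rw [pvFlush_fups, pvVals_snoc_drop _ _ (Or.inl h4)] at ih'
              rw [pvFlush_fups]
              exact ih'

-- ===== VERDICT (by name: the statement is the Claim_ definition above) =====
theorem parse_memory_sections_py_spec : Claim_equal_parse_memory_sections_py := by
  intro content _
  unfold Spec_parse_memory_sections_py parse_memory_sections_py parse_memory_sections_py_alt
  exact pvKey (PySem.Str.splitlines content) ([], []) none (Or.inl rfl)
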